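-- pv_equiv track=rewrite | github.com/ColinsGitCode/JupyterNotebook | ipynbFiles/NBC/NBC.py | each_line_to_vector_sparseFormat
-- ===== SOURCE A (Python) =====
-- def each_line_to_vector_sparseFormat(line,dictKeysList):
--     '''Return the FULL format bag-of-words vector for a line'''
--     line = line.split(" ")
--     dictLength = len(dictKeysList)
--     vectorTemplate = {} # using dictionary
--     lineVector = vectorTemplate
--     for w in line:
--         if w in dictKeysList:
--             INDEX = dictKeysList.index(w)
--             if INDEX in lineVector.keys():
--                 lineVector[INDEX] += 1
--             else:
--                 lineVector[INDEX] = 1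
--     return lineVector
-- ===== SOURCE B (Python) =====
-- def each_line_to_vector_sparseFormat(line, dictKeysList):
--     '''Bag-of-words sparse vector: list the distinct in-dictionary words of the
--     line in first-occurrence order, then pair each with its total occurrence
--     count read off the word list directly -- no incremental counting.'''
--     words = line.split(" ")
--     firsts = []
--     for w in words:
--         if w in dictKeysList and w not in firsts:
--             firsts.append(w)
--     return {dictKeysList.index(w): words.count(w) for w in firsts}
-- ===== Notes on version B (the rewrite author's own statement) =====
-- stated objective: alternative
-- what changed: A fuses membership, index lookup and per-occurrence counter increments into one pass over the words; B instead extracts the distinct in-dictionary words in first-occurrence order and then emits each key exactly once with its total count taken from words.count, never incrementing anything.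
import Mathlib
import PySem

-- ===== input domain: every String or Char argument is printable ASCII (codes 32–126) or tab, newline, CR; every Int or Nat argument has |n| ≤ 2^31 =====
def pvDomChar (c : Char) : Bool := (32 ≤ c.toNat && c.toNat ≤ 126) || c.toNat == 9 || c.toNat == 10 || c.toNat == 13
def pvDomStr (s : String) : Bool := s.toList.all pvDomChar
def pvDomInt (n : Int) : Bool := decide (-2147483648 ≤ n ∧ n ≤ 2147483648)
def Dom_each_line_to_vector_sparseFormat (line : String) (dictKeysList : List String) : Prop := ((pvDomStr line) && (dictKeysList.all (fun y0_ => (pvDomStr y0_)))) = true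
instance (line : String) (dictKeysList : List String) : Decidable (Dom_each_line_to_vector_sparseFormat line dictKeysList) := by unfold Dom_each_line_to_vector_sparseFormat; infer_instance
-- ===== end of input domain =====

-- B lists the distinct in-dictionary words in first-occurrence order and emits each key
-- once with its total words.count, replacing A's fused per-occurrence increment loop
-- (objective: alternative).

-- ===== PORT A =====
def each_line_to_vector_sparseFormat (line : String) (dictKeysList : List String) : List (Int × Int) :=
  -- line = line.split(" "); the separator is non-empty so split? is always some
  let ws : List String := (PySem.Str.split? line " ").getD []
  -- the fused loop: for w in line: if w in dictKeysList: INDEX = dictKeysList.index(w); …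
  let lineVector : PySem.Dict Int Int :=
    ws.foldl (fun lv w =>
      if dictKeysList.contains w then
        -- w ∈ dictKeysList, so index? is some; getD 0 is never the default here
        let INDEX : Int := (((PySem.List.index? dictKeysList w).getD 0 : Nat) : Int)
        if lv.contains INDEX then lv.insert INDEX (lv.getD INDEX 0 + 1)
        else lv.insert INDEX 1
      else lv) PySem.Dict.empty
  lineVector.items

-- ===== PORT B =====
def each_line_to_vector_sparseFormat_alt (line : String) (dictKeysList : List String) : List (Int × Int) :=
  -- words = line.split(" ")
  let words : List String := (PySem.Str.split? line " ").getD []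
  -- firsts = []; for w in words: if w in dictKeysList and w not in firsts: firsts.append(w)
  let firsts : List String :=
    words.foldl (fun fs w =>
      if dictKeysList.contains w && !fs.contains w then fs ++ [w] else fs) []
  -- {dictKeysList.index(w): words.count(w) for w in firsts}; every w ∈ firsts is in the
  -- dictionary, so index never raises and getD 0 is never the default
  (firsts.foldl (fun d w =>
      d.insert (((PySem.List.index? dictKeysList w).getD 0 : Nat) : Int)
        ((PySem.List.count words w : Nat) : Int))
    (PySem.Dict.empty : PySem.Dict Int Int)).items

-- ===== PRECONDITION & SPEC =====
def Spec_each_line_to_vector_sparseFormat (line : String) (dictKeysList : List String) (out : List (Int × Int)) : Prop := out = each_line_to_vector_sparseFormat_alt line dictKeysList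
instance (line : String) (dictKeysList : List String) (out : List (Int × Int)) : Decidable (Spec_each_line_to_vector_sparseFormat line dictKeysList out) := by unfold Spec_each_line_to_vector_sparseFormat; infer_instance

-- ===== CLAIM (what is proved, stated in full; the proofs are below) =====
def Claim_equal_each_line_to_vector_sparseFormat : Prop := ∀ (line : String) (dictKeysList : List String), Dom_each_line_to_vector_sparseFormat line dictKeysList → Spec_each_line_to_vector_sparseFormat line dictKeysList (each_line_to_vector_sparseFormat line dictKeysList)

-- ===== LEMMAS AND PROOFS =====

-- A's index expression, as a total function (only ever used at w ∈ ds)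
def pvKeyOf (ds : List String) (w : String) : Int :=
  (((PySem.List.index? ds w).getD 0 : Nat) : Int)

-- B's first loop: the distinct in-dictionary words of ws in first-occurrence order
def pvFirsts (ds ws : List String) : List String :=
  ws.foldl (fun fs w => if ds.contains w && !fs.contains w then fs ++ [w] else fs) []

-- first-occurrence indices are injective on dictionary members
theorem pvKeyOf_inj (ds : List String) {w1 w2 : String} (h1 : w1 ∈ ds) (h2 : w2 ∈ ds)
    (h : pvKeyOf ds w1 = pvKeyOf ds w2) : w1 = w2 := by
  rcases Option.isSome_iff_exists.mp ((PySem.List.index?_isSome_iff ds w1).2 h1) with ⟨n1, hn1⟩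
  rcases Option.isSome_iff_exists.mp ((PySem.List.index?_isSome_iff ds w2).2 h2) with ⟨n2, hn2⟩
  have hkey : n1 = n2 := by
    simp only [pvKeyOf, hn1, hn2, Option.getD_some] at h
    exact_mod_cast h
  rcases PySem.List.getElem_of_index?_eq_some hn1 with ⟨hk1, he1, -⟩
  rcases PySem.List.getElem_of_index?_eq_some hn2 with ⟨hk2, he2, -⟩
  subst hkey
  rw [← he1, ← he2]

theorem pvCountAppendNe (ws : List String) {w u : String} (hue : u ≠ w) :
    (ws ++ [w]).count u = ws.count u := by
  have h : ¬ w = u := fun e => hue e.symm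
  simp [List.count_append, h]

theorem pvFirsts_append (ds ws : List String) (w : String) :
    pvFirsts ds (ws ++ [w])
      = if ds.contains w && !(pvFirsts ds ws).contains w
        then pvFirsts ds ws ++ [w] else pvFirsts ds ws := by
  unfold pvFirsts
  rw [List.foldl_append]
  rfl

-- the combined invariant over the processed prefix ws:
-- firsts is nodup, its members are the in-dictionary words of ws, and A's dict items
-- are exactly firsts mapped to (first-occurrence index, count in ws)
theorem pvInv (ds ws : List String) :
    (pvFirsts ds ws).Nodup
    ∧ (∀ u ∈ pvFirsts ds ws, u ∈ ds ∧ u ∈ ws)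
    ∧ (∀ u, u ∈ ds → u ∈ ws → u ∈ pvFirsts ds ws)
    ∧ (ws.foldl (fun lv w =>
        if ds.contains w then
          let INDEX : Int := (((PySem.List.index? ds w).getD 0 : Nat) : Int)
          if lv.contains INDEX then lv.insert INDEX (lv.getD INDEX 0 + 1)
          else lv.insert INDEX 1
        else lv) (PySem.Dict.empty : PySem.Dict Int Int)).items
      = (pvFirsts ds ws).map (fun u => (pvKeyOf ds u, ((ws.count u : Nat) : Int))) := by
  induction ws using List.reverseRecOn with
  | nil =>
      refine ⟨by simp [pvFirsts], by simp [pvFirsts], by simp [pvFirsts], ?_⟩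
      simp [pvFirsts]
      rfl
  | append_singleton ws w ih =>
      obtain ⟨hnd, hmem, hall, hitems⟩ := ih
      have hsubds : ∀ u ∈ pvFirsts ds ws, u ∈ ds := fun u hu => (hmem u hu).1
      -- keys of A's dict so far
      have hkeysnd : ((pvFirsts ds ws).map (pvKeyOf ds)).Nodup := by
        refine List.Nodup.map_on ?_ hnd
        intro x hx y hy hxy
        exact pvKeyOf_inj ds (hsubds x hx) (hsubds y hy) hxy
      rw [List.foldl_append, pvFirsts_append]
      simp only [List.foldl_cons, List.foldl_nil]
      by_cases hw : ds.contains w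
      · have hwds : w ∈ ds := by simpa using hw
        set lv := (ws.foldl (fun lv w =>
          if ds.contains w then
            let INDEX : Int := (((PySem.List.index? ds w).getD 0 : Nat) : Int)
            if lv.contains INDEX then lv.insert INDEX (lv.getD INDEX 0 + 1)
            else lv.insert INDEX 1
          else lv) (PySem.Dict.empty : PySem.Dict Int Int)) with hlv
        have hkeys : lv.keys = (pvFirsts ds ws).map (pvKeyOf ds) := by
          simp only [PySem.Dict.keys, hitems, List.map_map]
          rfl
        have hkeynd : lv.keys.Nodup := by rw [hkeys]; exact hkeysnd
        have hkeyexpr : (((PySem.List.index? ds w).getD 0 : Nat) : Int) = pvKeyOf ds w := rfl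
        have hcont : lv.contains (pvKeyOf ds w) = (pvFirsts ds ws).contains w := by
          rw [PySem.Dict.contains_eq_decide_mem_keys, hkeys]
          by_cases hwf : w ∈ pvFirsts ds ws
          · simp [hwf, List.mem_map]
            exact ⟨w, hwf, rfl⟩
          · have : pvKeyOf ds w ∉ (pvFirsts ds ws).map (pvKeyOf ds) := by
              intro hk
              rcases List.mem_map.1 hk with ⟨u, hu, hue⟩
              exact hwf ((pvKeyOf_inj ds (hsubds u hu) hwds hue) ▸ hu)
            simp [this, hwf]
        by_cases hwf : w ∈ pvFirsts ds ws
        · -- w already seen: A updates in place, firsts unchanged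
          have hcf : (pvFirsts ds ws).contains w = true := by simpa using hwf
          simp only [hw, hkeyexpr, hcont, hcf, Bool.not_true, Bool.and_false,
            Bool.false_eq_true, if_false, if_true]
          have hentry : (pvKeyOf ds w, ((ws.count w : Nat) : Int)) ∈ lv.items := by
            rw [hitems]
            exact List.mem_map.2 ⟨w, hwf, rfl⟩
          have hgetD : lv.getD (pvKeyOf ds w) 0 = ((ws.count w : Nat) : Int) :=
            PySem.Dict.getD_of_mem_items lv hentry hkeynd 0
          refine ⟨hnd, fun u hu => ⟨(hmem u hu).1, List.mem_append_left _ (hmem u hu).2⟩, ?_, ?_⟩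
          · intro u hud huw
            rcases List.mem_append.1 huw with h | h
            · exact hall u hud h
            · rw [List.mem_singleton.1 h]; exact hwf
          rw [PySem.Dict.items_insert_of_contains lv _ (by rw [hcont]; exact hcf),
            hitems, hgetD, List.map_map]
          refine List.map_congr_left ?_
          intro u hu
          simp only [Function.comp]
          by_cases hue : u = w
          · subst hue
            have : (pvKeyOf ds u == pvKeyOf ds u) = true := by simp
            simp only [this, if_true]
            have : (ws ++ [u]).count u = ws.count u + 1 := by
              rw [List.count_append]; simp
            rw [this]
            push_cast
            ring_nf
          · have : (pvKeyOf ds u == pvKeyOf ds w) = false := by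
              simp only [beq_eq_false_iff_ne, ne_eq]
              intro h
              exact hue (pvKeyOf_inj ds (hsubds u hu) hwds h)
            simp only [this, Bool.false_eq_true, if_false]
            rw [pvCountAppendNe ws hue]
        · -- w is new: A appends a fresh entry, firsts gains w
          have hcf : (pvFirsts ds ws).contains w = false := by simpa using hwf
          have hwold : w ∉ ws := fun h => hwf (hall w hwds h)
          simp only [hw, hkeyexpr, hcont, hcf, Bool.not_false, Bool.and_true,
            if_true, Bool.false_eq_true, if_false]
          refine ⟨?_, ?_, ?_, ?_⟩
          · exact List.Nodup.append hnd (List.nodup_singleton w)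
              (by simpa using fun h => hwf h)
          · intro u hu
            rcases List.mem_append.1 hu with h | h
            · exact ⟨(hmem u h).1, List.mem_append_left _ (hmem u h).2⟩
            · rw [List.mem_singleton.1 h]
              exact ⟨hwds, List.mem_append_right _ (List.mem_singleton_self w)⟩
          · intro u hud huw
            rcases List.mem_append.1 huw with h | h
            · exact List.mem_append_left _ (hall u hud h)
            · exact List.mem_append_right _ h
          · rw [PySem.Dict.items_insert_of_not_contains lv _ (by rw [hcont]; exact hcf),
              hitems, List.map_append]
            congr 1
            · refine List.map_congr_left ?_
              intro u hu
              have hue : u ≠ w := fun h => hwf (h ▸ hu)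
              rw [pvCountAppendNe ws hue]
            · have h0 : ws.count w = 0 := List.count_eq_zero.2 hwold
              simp [h0]
      · -- w not in the dictionary: nothing changes
        simp only [hw, Bool.false_and, Bool.false_eq_true, if_false]
        refine ⟨hnd, ?_, ?_, ?_⟩
        · exact fun u hu => ⟨(hmem u hu).1, List.mem_append_left _ (hmem u hu).2⟩
        · intro u hud huw
          rcases List.mem_append.1 huw with h | h
          · exact hall u hud h
          · rw [List.mem_singleton.1 h] at hud
            exact absurd (by simpa using hud) (by simpa using hw)
        · rw [hitems]
          refine List.map_congr_left ?_
          intro u hu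
          have hue : u ≠ w := by
            intro h
            have := (hmem u hu).1
            rw [h] at this
            exact absurd (by simpa using this) (by simpa using hw)
          rw [pvCountAppendNe ws hue]

-- B's second loop inserts distinct fresh keys into the empty dict, so it is a map
theorem pvAlt_items (ds words : List String) :
    ((pvFirsts ds words).foldl (fun d w =>
        d.insert (((PySem.List.index? ds w).getD 0 : Nat) : Int)
          ((PySem.List.count words w : Nat) : Int))
      (PySem.Dict.empty : PySem.Dict Int Int)).items
    = (pvFirsts ds words).map (fun u => (pvKeyOf ds u, ((words.count u : Nat) : Int))) := by
  obtain ⟨hnd, hmem, -, -⟩ := pvInv ds words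
  have hsubds : ∀ u ∈ pvFirsts ds words, u ∈ ds := fun u hu => (hmem u hu).1
  have hkeysnd : ((pvFirsts ds words).map (fun u => pvKeyOf ds u)).Nodup := by
    refine List.Nodup.map_on ?_ hnd
    intro x hx y hy hxy
    exact pvKeyOf_inj ds (hsubds x hx) (hsubds y hy) hxy
  show ((pvFirsts ds words).foldl (fun d w =>
      d.insert (pvKeyOf ds w) ((PySem.List.count words w : Nat) : Int))
    (PySem.Dict.empty : PySem.Dict Int Int)).items = _
  rw [PySem.Dict.items_foldl_insert_fresh _ _ _ _ (fun a _ => rfl) hkeysnd]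
  rw [show (PySem.Dict.empty : PySem.Dict Int Int).items = [] from rfl, List.nil_append]
  rfl

-- ===== VERDICT (by name: the statement is the Claim_ definition above) =====
theorem each_line_to_vector_sparseFormat_spec : Claim_equal_each_line_to_vector_sparseFormat := by
  intro line ds _
  unfold Spec_each_line_to_vector_sparseFormat
  simp only [each_line_to_vector_sparseFormat, each_line_to_vector_sparseFormat_alt]
  obtain ⟨-, -, -, hitems⟩ := pvInv ds ((PySem.Str.split? line " ").getD [])
  rw [hitems, ← pvAlt_items ds ((PySem.Str.split? line " ").getD [])]
  rfl
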